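-- pv_equiv track=rewrite | github.com/rutgerhrm/digiscan | archived/filtering.py | filter_testssl_output
-- ===== SOURCE A (Python) =====
-- def filter_testssl_output(data):
--     if data is None:
--         return None, None
--
--     # Define the keys to filter along with their readable names and categories
--     ssl_tls_keys = {
--         'SSLv2': 'SSL 2.0',
--         'SSLv3': 'SSL 3.0',
--         'TLS1': 'TLS 1.0',
--         'TLS1_1': 'TLS 1.1',
--         'TLS1_2': 'TLS 1.2',
--         'TLS1_3': 'TLS 1.3',
--         'FS_ciphers': 'Ciphers',
--         'OCSP_stapling': 'OCSP Stapling',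
--         'cert_keySize': 'RSA Key Length',
--         'FS_ECDHE_curves': 'Elliptic Curve',
--         'HSTS_time': 'Strict-Transport-Security (HSTS)',
--         'secure_renego': 'Secure Renegotiation',
--         'DH_groups': 'Finite field-groep'
--     }
--
--     headers_keys = {
--         'cookie_secure': 'Cookie Secure Flag',
--         'cookie_httponly': 'Cookie HTTPOnly Flag',
--         'X-Frame-Options': 'X-Frame-Options',
--         'X-Content-Type-Options': 'X-Content-Type-Options',
--         'Content-Security-Policy': 'Content-Security-Policy',
--         'Referrer-Policy': 'Referrer-Policy',
--     }
--
--     # Initialize filtered objects with all keys set to "not found"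
--     filtered_ssl_tls = {key: "not found" for key in ssl_tls_keys.values()}
--     filtered_headers = {key: "not found" for key in headers_keys.values()}
--
--     # Filter out the desired objects and update the dictionaries with actual findings
--     for item in data:
--         original_key = item.get('id')
--         finding = item.get('finding')
--         if original_key in ssl_tls_keys:
--             readable_key = ssl_tls_keys[original_key]
--             filtered_ssl_tls[readable_key] = finding
--         elif original_key in headers_keys:
--             readable_key = headers_keys[original_key]
--             filtered_headers[readable_key] = finding
--
--     return filtered_ssl_tls, filtered_headers
-- ===== SOURCE B (Python) =====
-- def filter_testssl_output(data):
--     if data is None: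
--         return None, None
--
--     ssl_tls_keys = {
--         'SSLv2': 'SSL 2.0',
--         'SSLv3': 'SSL 3.0',
--         'TLS1': 'TLS 1.0',
--         'TLS1_1': 'TLS 1.1',
--         'TLS1_2': 'TLS 1.2',
--         'TLS1_3': 'TLS 1.3',
--         'FS_ciphers': 'Ciphers',
--         'OCSP_stapling': 'OCSP Stapling',
--         'cert_keySize': 'RSA Key Length',
--         'FS_ECDHE_curves': 'Elliptic Curve',
--         'HSTS_time': 'Strict-Transport-Security (HSTS)',
--         'secure_renego': 'Secure Renegotiation',
--         'DH_groups': 'Finite field-groep'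
--     }
--
--     headers_keys = {
--         'cookie_secure': 'Cookie Secure Flag',
--         'cookie_httponly': 'Cookie HTTPOnly Flag',
--         'X-Frame-Options': 'X-Frame-Options',
--         'X-Content-Type-Options': 'X-Content-Type-Options',
--         'Content-Security-Policy': 'Content-Security-Policy',
--         'Referrer-Policy': 'Referrer-Policy',
--     }
--
--     # Index the data once: id -> finding, last occurrence wins (as repeated
--     # dict assignment does in the original loop).
--     findings = {item.get('id'): item.get('finding') for item in data}
--
--     filtered_ssl_tls = {readable: findings.get(orig, 'not found')
--                         for orig, readable in ssl_tls_keys.items()}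
--     filtered_headers = {readable: findings.get(orig, 'not found')
--                         for orig, readable in headers_keys.items()}
--     return filtered_ssl_tls, filtered_headers
-- ===== Notes on version B (the rewrite author's own statement) =====
-- stated objective: alternative
-- what changed: Instead of looping over the data and branching each item into two pre-initialized 'not found' dicts, B builds one inverted id->finding index over the data (last occurrence wins, as repeated dict assignment does) and then assembles each output dict by a key-driven comprehension over the key tables.
import Mathlib
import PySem

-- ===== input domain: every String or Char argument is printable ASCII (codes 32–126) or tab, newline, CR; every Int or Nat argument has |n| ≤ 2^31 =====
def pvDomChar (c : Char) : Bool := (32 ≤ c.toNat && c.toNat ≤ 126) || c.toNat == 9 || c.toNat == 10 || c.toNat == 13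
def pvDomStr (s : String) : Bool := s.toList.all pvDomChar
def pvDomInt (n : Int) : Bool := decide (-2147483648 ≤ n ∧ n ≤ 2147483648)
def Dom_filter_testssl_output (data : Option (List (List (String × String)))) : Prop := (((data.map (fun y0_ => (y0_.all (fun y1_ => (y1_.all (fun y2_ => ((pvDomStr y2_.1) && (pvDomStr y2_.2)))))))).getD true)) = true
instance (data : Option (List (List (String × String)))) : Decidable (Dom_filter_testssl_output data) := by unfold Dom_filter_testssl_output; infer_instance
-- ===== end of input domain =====

-- B builds one inverted id→finding index over the data and then assembles each output
-- dict by a key-driven comprehension over the key tables (objective: alternative decomposition).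
-- Python's None (a missing 'finding' on a matched id) is not a String; such inputs are outside Pre_.

-- item.get(k) / lookup in a literal dict table: first match in the association list
def pvLookup (m : List (String × String)) (k : String) : Option String :=
  (m.find? (fun p => p.1 == k)).map (·.2)

-- the two literal key tables both Pythons contain (original key, readable name)
def pvSslKeys : List (String × String) :=
  [("SSLv2", "SSL 2.0"), ("SSLv3", "SSL 3.0"), ("TLS1", "TLS 1.0"),
   ("TLS1_1", "TLS 1.1"), ("TLS1_2", "TLS 1.2"), ("TLS1_3", "TLS 1.3"),
   ("FS_ciphers", "Ciphers"), ("OCSP_stapling", "OCSP Stapling"),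
   ("cert_keySize", "RSA Key Length"), ("FS_ECDHE_curves", "Elliptic Curve"),
   ("HSTS_time", "Strict-Transport-Security (HSTS)"),
   ("secure_renego", "Secure Renegotiation"), ("DH_groups", "Finite field-groep")]

def pvHdrKeys : List (String × String) :=
  [("cookie_secure", "Cookie Secure Flag"), ("cookie_httponly", "Cookie HTTPOnly Flag"),
   ("X-Frame-Options", "X-Frame-Options"), ("X-Content-Type-Options", "X-Content-Type-Options"),
   ("Content-Security-Policy", "Content-Security-Policy"), ("Referrer-Policy", "Referrer-Policy")]

-- ===== PORT A =====
-- loop over data, branching each item into one of the two pre-initialized dicts.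
-- `.getD ""` stands for a Python None finding; Pre_ excludes inputs where it is hit.
def filter_testssl_output (data : Option (List (List (String × String)))) : (Option (List (String × String))) × (Option (List (String × String))) :=
  match data with
  | none => (none, none)
  | some xs =>
    let init1 : PySem.Dict String String := PySem.Dict.ofList (pvSslKeys.map (fun p => (p.2, "not found")))
    let init2 : PySem.Dict String String := PySem.Dict.ofList (pvHdrKeys.map (fun p => (p.2, "not found")))
    let st := xs.foldl (fun (st : PySem.Dict String String × PySem.Dict String String) item =>
      let origKey := pvLookup item "id"
      let finding := pvLookup item "finding"
      match origKey with
      | none => st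
      | some k =>
        match pvLookup pvSslKeys k with
        | some r => (st.1.insert r (finding.getD ""), st.2)
        | none =>
          match pvLookup pvHdrKeys k with
          | some r => (st.1, st.2.insert r (finding.getD ""))
          | none => st) (init1, init2)
    (some st.1.items, some st.2.items)

-- ===== PORT B =====
-- index first (findings : id → finding, last wins), then map over each key table.
-- `.getD ""` again stands for Python's None finding, excluded by Pre_.
def filter_testssl_output_alt (data : Option (List (List (String × String)))) : (Option (List (String × String))) × (Option (List (String × String))) :=
  match data with
  | none => (none, none)
  | some xs =>
    let findings : PySem.Dict (Option String) (Option String) :=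
      xs.foldl (fun d item => d.insert (pvLookup item "id") (pvLookup item "finding")) PySem.Dict.empty
    let f1 : PySem.Dict String String :=
      PySem.Dict.ofList (pvSslKeys.map (fun p => (p.2, (findings.getD (some p.1) (some "not found")).getD "")))
    let f2 : PySem.Dict String String :=
      PySem.Dict.ofList (pvHdrKeys.map (fun p => (p.2, (findings.getD (some p.1) (some "not found")).getD "")))
    (some f1.items, some f2.items)

-- ===== PRECONDITION & SPEC =====
-- Pre_ excludes inputs where an item whose id matches a key table has no 'finding' key:
-- there Python A stores None — not a String, so not a value of the declared return type.
def Pre_filter_testssl_output (data : Option (List (List (String × String)))) : Prop :=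
  ((data.getD []).all (fun item =>
    match pvLookup item "id" with
    | none => true
    | some k =>
      !((pvLookup pvSslKeys k).isSome || (pvLookup pvHdrKeys k).isSome)
        || (pvLookup item "finding").isSome)) = true
instance (data : Option (List (List (String × String)))) : Decidable (Pre_filter_testssl_output data) := by unfold Pre_filter_testssl_output; infer_instance

def pvWitness_filter_testssl_output : (Option (List (List (String × String)))) :=
  some [[("id", "SSLv2"), ("finding", "offered")], [("id", "other"), ("x", "y")]]

def Spec_filter_testssl_output (data : Option (List (List (String × String)))) (out : (Option (List (String × String))) × (Option (List (String × String)))) : Prop := out = filter_testssl_output_alt data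
instance (data : Option (List (List (String × String)))) (out : (Option (List (String × String))) × (Option (List (String × String)))) : Decidable (Spec_filter_testssl_output data out) := by unfold Spec_filter_testssl_output; infer_instance

-- ===== CLAIM (what is proved, stated in full; the proofs are below) =====
def Claim_equal_filter_testssl_output : Prop := ∀ (data : Option (List (List (String × String)))), Dom_filter_testssl_output data → Pre_filter_testssl_output data → Spec_filter_testssl_output data (filter_testssl_output data)

-- ===== LEMMAS AND PROOFS =====

-- B's per-table value for original key k, given the findings index fd
def pvRes (fd : PySem.Dict (Option String) (Option String)) (k : String) : String :=
  (fd.getD (some k) (some "not found")).getD ""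

-- B's output dict for a key table m and a findings index fd
def pvOut (m : List (String × String)) (fd : PySem.Dict (Option String) (Option String)) : PySem.Dict String String :=
  PySem.Dict.ofList (m.map (fun p => (p.2, pvRes fd p.1)))

theorem pvOut_items (m : List (String × String)) (fd : PySem.Dict (Option String) (Option String))
    (h : (m.map (·.2)).Nodup) :
    (pvOut m fd).items = m.map (fun p => (p.2, pvRes fd p.1)) := by
  have := PySem.Dict.items_foldl_insert_fresh (l := m.map (fun p => (p.2, pvRes fd p.1)))
      (k := Prod.fst) (v := Prod.snd) (d := PySem.Dict.empty)
      (by intro a _; exact PySem.Dict.contains_empty a.1)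
      (by simpa [Function.comp] using h)
  simpa [pvOut, PySem.Dict.ofList] using this

theorem pvOut_insert_none (m : List (String × String)) (fd : PySem.Dict (Option String) (Option String)) (v : Option String) :
    pvOut m (fd.insert none v) = pvOut m fd := by
  unfold pvOut
  congr 1
  refine List.map_congr_left (fun p _ => ?_)
  simp [pvRes, PySem.Dict.getD_insert]

theorem pvOut_insert_miss (m : List (String × String)) (fd : PySem.Dict (Option String) (Option String))
    (k : String) (v : Option String) (hk : ∀ p ∈ m, p.1 ≠ k) :
    pvOut m (fd.insert (some k) v) = pvOut m fd := by
  unfold pvOut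
  congr 1
  refine List.map_congr_left (fun p hp => ?_)
  simp [pvRes, PySem.Dict.getD_insert, hk p hp]

theorem pvOut_insert_hit (m : List (String × String)) (fd : PySem.Dict (Option String) (Option String))
    (k r : String) (v : Option String)
    (h1 : (m.map (·.1)).Nodup) (h2 : (m.map (·.2)).Nodup) (hmem : (k, r) ∈ m) :
    (pvOut m fd).insert r (v.getD "") = pvOut m (fd.insert (some k) v) := by
  have hcont : (pvOut m fd).contains r = true := by
    have : r ∈ (pvOut m fd).keys := by
      unfold PySem.Dict.keys
      rw [pvOut_items m fd h2]
      simp only [List.map_map]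
      exact List.mem_map.mpr ⟨(k, r), hmem, rfl⟩
    rw [PySem.Dict.contains_eq_decide_mem_keys]
    exact decide_eq_true this
  apply PySem.Dict.ext
  rw [PySem.Dict.items_insert_of_contains _ _ hcont, pvOut_items m fd h2,
      pvOut_items m _ h2, List.map_map]
  refine List.map_congr_left (fun p hp => ?_)
  simp only [Function.comp]
  by_cases hpr : p.2 = r
  · have hpk : p = (k, r) := List.inj_on_of_nodup_map h2 hp hmem hpr
    simp [hpk, pvRes]
  · have hpk : p.1 ≠ k := by
      intro hc
      exact hpr (congrArg Prod.snd (List.inj_on_of_nodup_map h1 hp hmem hc))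
    simp [hpr, pvRes, PySem.Dict.getD_insert, hpk]

-- facts about the literal tables
theorem pvSsl_nodup1 : (pvSslKeys.map (·.1)).Nodup := by decide
theorem pvSsl_nodup2 : (pvSslKeys.map (·.2)).Nodup := by decide
theorem pvHdr_nodup1 : (pvHdrKeys.map (·.1)).Nodup := by decide
theorem pvHdr_nodup2 : (pvHdrKeys.map (·.2)).Nodup := by decide

theorem pvLookup_some {m : List (String × String)} {k r : String}
    (h : pvLookup m k = some r) : (k, r) ∈ m := by
  unfold pvLookup at h
  rcases Option.map_eq_some_iff.mp h with ⟨p, hp, hpr⟩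
  have hmem := List.mem_of_find?_eq_some hp
  have hkey : p.1 = k := by simpa using List.find?_some hp
  have : p = (k, r) := by cases p; simp_all
  exact this ▸ hmem

theorem pvLookup_none {m : List (String × String)} {k : String}
    (h : pvLookup m k = none) : ∀ p ∈ m, p.1 ≠ k := by
  unfold pvLookup at h
  intro p hp
  have := List.find?_eq_none.mp (Option.map_eq_none_iff.mp h) p hp
  simpa using this

theorem pvSsl_hdr_disjoint {k r : String} (h : (k, r) ∈ pvSslKeys) :
    ∀ q ∈ pvHdrKeys, q.1 ≠ k := by
  fin_cases h <;> decide

-- main loop invariant: A's two-dict fold over the data IS B's index fold, rendered through pvOut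
theorem pvMain (xs : List (List (String × String))) (fd : PySem.Dict (Option String) (Option String)) :
    xs.foldl (fun (st : PySem.Dict String String × PySem.Dict String String) item =>
      let origKey := pvLookup item "id"
      let finding := pvLookup item "finding"
      match origKey with
      | none => st
      | some k =>
        match pvLookup pvSslKeys k with
        | some r => (st.1.insert r (finding.getD ""), st.2)
        | none =>
          match pvLookup pvHdrKeys k with
          | some r => (st.1, st.2.insert r (finding.getD ""))
          | none => st) (pvOut pvSslKeys fd, pvOut pvHdrKeys fd)
    = (pvOut pvSslKeys (xs.foldl (fun d item => d.insert (pvLookup item "id") (pvLookup item "finding")) fd),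
       pvOut pvHdrKeys (xs.foldl (fun d item => d.insert (pvLookup item "id") (pvLookup item "finding")) fd)) := by
  induction xs generalizing fd with
  | nil => rfl
  | cons item rest ih =>
    simp only [List.foldl_cons]
    have hstep :
        (match pvLookup item "id" with
          | none => (pvOut pvSslKeys fd, pvOut pvHdrKeys fd)
          | some k =>
            match pvLookup pvSslKeys k with
            | some r => ((pvOut pvSslKeys fd).insert r ((pvLookup item "finding").getD ""), pvOut pvHdrKeys fd)
            | none =>
              match pvLookup pvHdrKeys k with
              | some r => (pvOut pvSslKeys fd, (pvOut pvHdrKeys fd).insert r ((pvLookup item "finding").getD ""))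
              | none => (pvOut pvSslKeys fd, pvOut pvHdrKeys fd))
        = (pvOut pvSslKeys (fd.insert (pvLookup item "id") (pvLookup item "finding")),
           pvOut pvHdrKeys (fd.insert (pvLookup item "id") (pvLookup item "finding"))) := by
      cases hid : pvLookup item "id" with
      | none => simp [pvOut_insert_none]
      | some k =>
        cases hssl : pvLookup pvSslKeys k with
        | some r =>
          have hmem := pvLookup_some hssl
          simp only [hssl]
          rw [pvOut_insert_hit pvSslKeys fd k r _ pvSsl_nodup1 pvSsl_nodup2 hmem,
              pvOut_insert_miss pvHdrKeys fd k _ (pvSsl_hdr_disjoint hmem)]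
        | none =>
          cases hhdr : pvLookup pvHdrKeys k with
          | some r =>
            have hmem := pvLookup_some hhdr
            simp only [hssl, hhdr]
            rw [pvOut_insert_hit pvHdrKeys fd k r _ pvHdr_nodup1 pvHdr_nodup2 hmem,
                pvOut_insert_miss pvSslKeys fd k _ (pvLookup_none hssl)]
          | none =>
            simp only [hssl, hhdr]
            rw [pvOut_insert_miss pvSslKeys fd k _ (pvLookup_none hssl),
                pvOut_insert_miss pvHdrKeys fd k _ (pvLookup_none hhdr)]
    rw [hstep, ih]

theorem pvOut_empty_ssl : pvOut pvSslKeys PySem.Dict.empty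
    = PySem.Dict.ofList (pvSslKeys.map (fun p => (p.2, "not found"))) := by decide

theorem pvOut_empty_hdr : pvOut pvHdrKeys PySem.Dict.empty
    = PySem.Dict.ofList (pvHdrKeys.map (fun p => (p.2, "not found"))) := by decide

-- ===== VERDICT (by name: the statement is the Claim_ definition above) =====
theorem filter_testssl_output_spec : Claim_equal_filter_testssl_output := by
  unfold Claim_equal_filter_testssl_output
  intro data _ _
  unfold Spec_filter_testssl_output filter_testssl_output filter_testssl_output_alt
  cases data with
  | none => rfl
  | some xs =>
    simp only
    rw [← pvOut_empty_ssl, ← pvOut_empty_hdr, pvMain xs PySem.Dict.empty]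
    rfl
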